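-- pv_equiv track=rewrite | github.com/gtavella/Esami | 03-07-20/es2_.py | hanno_ordine
-- ===== SOURCE A (Python) =====
-- def hanno_ordine(sottolista,L):
--     primo=sottolista[0]
--     if primo not in L:
--         return False
--     i_prec=L.index(primo)
--     for x in sottolista[1:]:
--         if x not in L:
--             return False
--         i=L.index(x)
--         if i<i_prec:
--             return False
--         i_prec=i
--     return True
-- ===== SOURCE B (Python) =====
-- def hanno_ordine(sottolista, L):
--     indices = []
--     for x in sottolista:
--         if x not in L:
--             return False
--         indices.append(L.index(x))
--     return indices == sorted(indices)
-- ===== Notes on version B (the rewrite author's own statement) =====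
-- stated objective: idiomatic
-- what changed: Instead of a running previous-index comparison with early exits, B collects each element's first index in one pass and returns whether the index list equals its sorted copy.
import Mathlib
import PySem

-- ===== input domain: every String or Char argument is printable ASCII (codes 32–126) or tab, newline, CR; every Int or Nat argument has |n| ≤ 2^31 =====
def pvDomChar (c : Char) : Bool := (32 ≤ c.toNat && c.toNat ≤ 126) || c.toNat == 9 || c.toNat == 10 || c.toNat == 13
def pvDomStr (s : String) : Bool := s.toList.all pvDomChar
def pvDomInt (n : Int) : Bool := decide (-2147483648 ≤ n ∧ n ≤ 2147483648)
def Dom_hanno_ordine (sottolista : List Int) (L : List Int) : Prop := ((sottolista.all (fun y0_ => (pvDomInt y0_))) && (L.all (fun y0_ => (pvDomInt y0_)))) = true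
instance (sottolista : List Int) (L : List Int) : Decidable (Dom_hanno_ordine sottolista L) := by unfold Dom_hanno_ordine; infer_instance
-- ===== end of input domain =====

-- B collects each element's first index in one pass and compares the index list with its sorted copy (idiomatic); A scans with a running previous index.


-- ===== PORT A =====
-- the 'for x in sottolista[1:]' loop carrying i_prec
def hannoLoopA (rest : List Int) (L : List Int) (iPrec : Nat) : Bool :=
  match rest with
  | [] => true
  | x :: xs =>
    if !(L.contains x) then false
    else
      match PySem.List.index? L x with
      | none => false
      | some i => if i < iPrec then false else hannoLoopA xs L i

def hanno_ordine (sottolista : List Int) (L : List Int) : Bool :=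
  match sottolista with
  | [] => false   -- Python raises IndexError here (sottolista[0]); excluded by Pre_
  | primo :: rest =>
    if !(L.contains primo) then false
    else
      match PySem.List.index? L primo with
      | none => false
      | some iPrec => hannoLoopA rest L iPrec

-- ===== PORT B =====
-- the 'for x in sottolista' loop appending L.index(x) to indices
def hannoLoopB (sotto : List Int) (L : List Int) (indices : List Nat) : Bool :=
  match sotto with
  | [] => indices == PySem.List.sorted indices (fun a => a) false
  | x :: xs =>
    if !(L.contains x) then false
    else
      match PySem.List.index? L x with
      | none => false
      | some i => hannoLoopB xs L (indices ++ [i])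

def hanno_ordine_alt (sottolista : List Int) (L : List Int) : Bool :=
  hannoLoopB sottolista L []

-- ===== PRECONDITION & SPEC =====
-- Pre_ excludes only the empty sottolista, on which A raises IndexError at sottolista[0].
def Pre_hanno_ordine (sottolista : List Int) (L : List Int) : Prop := sottolista ≠ []
instance (sottolista : List Int) (L : List Int) : Decidable (Pre_hanno_ordine sottolista L) := by unfold Pre_hanno_ordine; infer_instance
def pvWitness_hanno_ordine : List Int × List Int := ([1, 2], [1, 2, 3])

def Spec_hanno_ordine (sottolista : List Int) (L : List Int) (out : Bool) : Prop := out = hanno_ordine_alt sottolista L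
instance (sottolista : List Int) (L : List Int) (out : Bool) : Decidable (Spec_hanno_ordine sottolista L out) := by unfold Spec_hanno_ordine; infer_instance

-- ===== CLAIM (what is proved, stated in full; the proofs are below) =====
def Claim_equal_hanno_ordine : Prop := ∀ (sottolista : List Int) (L : List Int), Dom_hanno_ordine sottolista L → Pre_hanno_ordine sottolista L → Spec_hanno_ordine sottolista L (hanno_ordine sottolista L)

-- ===== LEMMAS AND PROOFS =====

-- once the accumulated index list has a descent, B's loop can only return false
theorem hannoLoopB_bad (xs : List Int) (L : List Int) (acc : List Nat)
    (h : ¬ acc.Pairwise (· ≤ ·)) : hannoLoopB xs L acc = false := by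
  induction xs generalizing acc with
  | nil =>
    simp only [hannoLoopB]
    by_contra hne
    simp only [Bool.not_eq_false, beq_iff_eq] at hne
    exact h (hne ▸ PySem.List.sorted_pairwise (key := fun a : Nat => a) (xs := acc))
  | cons x xs ih =>
    simp only [hannoLoopB]
    split
    · rfl
    · match hidx : PySem.List.index? L x with
      | none => rfl
      | some i =>
        exact ih (acc ++ [i]) (fun hp => h (hp.sublist (List.sublist_append_left acc [i])))

-- invariant: acc non-decreasing with last element iPrec makes B's loop equal A's loop
theorem hannoLoopB_eq (xs : List Int) (L : List Int) (iPrec : Nat) (acc : List Nat)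
    (h : (acc ++ [iPrec]).Pairwise (· ≤ ·)) :
    hannoLoopB xs L (acc ++ [iPrec]) = hannoLoopA xs L iPrec := by
  induction xs generalizing iPrec acc with
  | nil =>
    simp only [hannoLoopB, hannoLoopA]
    rw [PySem.List.sorted_eq_self_of_pairwise (acc ++ [iPrec]) (fun a => a) h]
    simp
  | cons x xs ih =>
    simp only [hannoLoopB, hannoLoopA]
    split
    · rfl
    · match hidx : PySem.List.index? L x with
      | none => rfl
      | some i =>
        by_cases hlt : i < iPrec
        · simp only [hlt, if_true]
          apply hannoLoopB_bad
          intro hp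
          have : iPrec ≤ i := by
            have := (List.pairwise_append.mp (by simpa using hp)).2.1
            simpa using this
          omega
        · simp only [hlt, if_false]
          have hp' : ((acc ++ [iPrec]) ++ [i]).Pairwise (· ≤ ·) := by
            rw [List.pairwise_append]
            refine ⟨h, by simp, ?_⟩
            intro a ha b hb
            simp at hb
            subst hb
            rcases (List.mem_append.mp ha) with ha' | ha'
            · have hall : a ≤ iPrec := by
                have := List.pairwise_append.mp h
                have := this.2.2 a ha' iPrec (by simp)
                exact this
              omega
            · simp at ha'; omega
          exact ih i (acc ++ [iPrec]) hp'

-- ===== VERDICT (by name: the statement is the Claim_ definition above) =====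
theorem hanno_ordine_spec : Claim_equal_hanno_ordine := by
  intro sottolista L _ hpre
  unfold Spec_hanno_ordine
  match sottolista with
  | [] => exact absurd rfl hpre
  | primo :: rest =>
    simp only [hanno_ordine, hanno_ordine_alt, hannoLoopB]
    split
    · rfl
    · match hidx : PySem.List.index? L primo with
      | none => rfl
      | some iPrec =>
        have := hannoLoopB_eq rest L iPrec [] (by simp)
        simpa using this.symm
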